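-- pv_equiv track=rewrite | github.com/niknal357/5inarow_tictactoe | tictactoe_lib.py | calculate_grid_intersection_values
-- ===== SOURCE A (Python) =====
-- def get_of_grid_3(grid, pos):
--     if pos[0] < 0 or pos[0] > len(grid)-1 or pos[1] < 0 or pos[1] > len(grid[0])-1:
--         return 'n'
--     else:
--         return grid[pos[0]][pos[1]]
--
-- def get_line_3(grid, pos, dist, dir, invert=False):
--     out = []
--     for i in range(dist):
--         curpos = (pos[0]+dir[0]*i, pos[1]+dir[1]*i)
--         item = get_of_grid_3(grid, curpos)
--         if invert:
--             if item == 'x':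
--                 out.append('o')
--             elif item == 'o':
--                 out.append('x')
--             else:
--                 out.append(item)
--         else:
--             out.append(item)
--     return out
--
-- def calculate_grid_intersection_values(grid, calculating_for):
--     value_grid = []
--     for x in range(len(grid)):
--         value_grid.append([1]*len(grid[0]))
--     for x in range(len(grid)):
--         for y in range(len(grid[0])):
--             for dir in [(1, 1), (1, 0), (1, -1), (0, -1)]:
--                 line = get_line_3(grid, (x, y), 5, dir, False)
--                 x_count = 1
--                 cnt = 0
--                 for element in line:
--                     if element == calculating_for:
--                         x_count += 1
--                         cnt += 1
--                         continue
--                     elif element == '_':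
--                         cnt += 1
--                         continue
--                     else:
--                         break
--                 if cnt == 5 and x_count != 0:
--                     for i in range(5):
--                         if line[i] == '_':
--                             value_grid[x+dir[0]*i][y+dir[1]*i] *= x_count
--                             value_grid[x+dir[0]*i][y+dir[1]*i] *= x_count
--                         else:
--                             value_grid[x+dir[0]*i][y+dir[1]*i] = 0
--     return value_grid
-- ===== SOURCE B (Python) =====
-- def calculate_grid_intersection_values(grid, calculating_for):
--     rows = len(grid)
--     cols = len(grid[0])
--     dirs = ((1, 1), (1, 0), (1, -1), (0, -1))
--
--     def window(sx, sy, dx, dy):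
--         # the 5 cells from (sx,sy) along (dx,dy), or None if any is off-grid
--         # or is neither calculating_for nor '_'
--         cells = []
--         for i in range(5):
--             px, py = sx + dx * i, sy + dy * i
--             if not (0 <= px < rows and 0 <= py < cols):
--                 return None
--             c = grid[px][py]
--             if c != calculating_for and c != '_':
--                 return None
--             cells.append(c)
--         return cells
--
--     def cell_value(x, y):
--         v = 1
--         for dx, dy in dirs:
--             for o in range(5):
--                 w = window(x - dx * o, y - dy * o, dx, dy)
--                 if w is not None:
--                     if grid[x][y] == '_':
--                         k = 1 + w.count(calculating_for)
--                         v *= k * k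
--                     else:
--                         return 0
--         return v
--
--     return [[cell_value(x, y) for y in range(cols)] for x in range(rows)]
-- ===== Notes on version B (the rewrite author's own statement) =====
-- stated objective: alternative
-- what changed: A iterates over all windows and destructively writes multipliers/zeros into a mutable value grid; B builds each output cell independently, scanning the <=20 windows that cover that cell and combining their contributions functionally (product of (1+k)^2, or 0 if the cell is occupied by calculating_for in a valid window).
-- outside the precondition, e.g. on calculate_grid_intersection_values([], 'x'): A returns [], B raises IndexError
import Mathlib
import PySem

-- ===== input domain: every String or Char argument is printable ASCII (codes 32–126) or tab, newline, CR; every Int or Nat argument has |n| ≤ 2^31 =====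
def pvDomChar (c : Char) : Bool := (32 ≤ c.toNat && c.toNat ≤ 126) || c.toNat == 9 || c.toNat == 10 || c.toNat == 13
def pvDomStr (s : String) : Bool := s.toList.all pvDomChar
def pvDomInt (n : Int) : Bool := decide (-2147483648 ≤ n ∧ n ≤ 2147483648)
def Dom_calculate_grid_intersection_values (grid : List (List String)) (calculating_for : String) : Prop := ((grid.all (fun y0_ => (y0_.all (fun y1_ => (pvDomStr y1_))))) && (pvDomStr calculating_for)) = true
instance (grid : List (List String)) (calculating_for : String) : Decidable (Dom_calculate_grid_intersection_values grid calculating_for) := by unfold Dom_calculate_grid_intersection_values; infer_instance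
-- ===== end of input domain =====

-- B builds each output cell independently from the windows that cover it (functional, per-cell),
-- instead of A's destructive per-window writes into a mutable grid; objective: alternative decomposition.

-- ===== PORT A =====
def get_of_grid_3 (grid : List (List String)) (pos : Int × Int) : String :=
  if pos.1 < 0 ∨ pos.1 > (grid.length : Int) - 1 ∨ pos.2 < 0 ∨ pos.2 > ((grid.headD []).length : Int) - 1 then "n"
  else
    -- indices are in range here except on ragged rows shorter than row 0 (Python raises; excluded by Pre_)
    PySem.List.pyGetD (PySem.List.pyGetD grid pos.1 []) pos.2 "n"

def get_line_3 (grid : List (List String)) (pos : Int × Int) (dist : Int) (dir : Int × Int) (invert : Bool) : List String :=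
  (PySem.List.pyRange 0 dist 1).foldl (fun out i =>
    let curpos : Int × Int := (pos.1 + dir.1 * i, pos.2 + dir.2 * i)
    let item := get_of_grid_3 grid curpos
    if invert then
      if item = "x" then out ++ ["o"]
      else if item = "o" then out ++ ["x"]
      else out ++ [item]
    else out ++ [item]) []

-- the inner 'for element in line' loop with its break
def pvA_countLoop (cf : String) : List String → Int × Int → Int × Int
  | [], st => st
  | e :: rest, st =>
    if e = cf then pvA_countLoop cf rest (st.1 + 1, st.2 + 1)
    else if e = "_" then pvA_countLoop cf rest (st.1, st.2 + 1)
    else st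

-- value_grid[xi][yi] = v  (Python list assignment; in range under Pre_)
def pvA_setCell (vg : List (List Int)) (xi yi : Int) (v : Int) : List (List Int) :=
  PySem.List.pySetD vg xi (PySem.List.pySetD (PySem.List.pyGetD vg xi []) yi v)

-- value_grid[xi][yi] *= m
def pvA_mulCell (vg : List (List Int)) (xi yi : Int) (m : Int) : List (List Int) :=
  pvA_setCell vg xi yi (PySem.List.pyGetD (PySem.List.pyGetD vg xi []) yi 0 * m)

def calculate_grid_intersection_values (grid : List (List String)) (calculating_for : String) : List (List Int) :=
  let value_grid : List (List Int) :=
    (PySem.List.pyRange 0 (grid.length : Int) 1).foldl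
      (fun vg _x => vg ++ [PySem.List.pyRepeat [(1 : Int)] ((grid.headD []).length : Int)]) []
  (PySem.List.pyRange 0 (grid.length : Int) 1).foldl (fun vg x =>
    (PySem.List.pyRange 0 ((grid.headD []).length : Int) 1).foldl (fun vg y =>
      ([((1:Int),(1:Int)), (1,0), (1,-1), (0,-1)] : List (Int × Int)).foldl (fun vg dir =>
        let line := get_line_3 grid (x, y) 5 dir false
        let st := pvA_countLoop calculating_for line (1, 0)
        if st.2 = 5 ∧ st.1 ≠ 0 then
          (PySem.List.pyRange 0 5 1).foldl (fun vg i =>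
            if PySem.List.pyGetD line i "" = "_" then
              pvA_mulCell (pvA_mulCell vg (x + dir.1 * i) (y + dir.2 * i) st.1) (x + dir.1 * i) (y + dir.2 * i) st.1
            else
              pvA_setCell vg (x + dir.1 * i) (y + dir.2 * i) 0) vg
        else vg) vg) vg) value_grid

-- ===== PORT B =====
-- the 'window' helper: the 5 cells from (sx,sy) along (dx,dy), or none
def pvB_winGo (grid : List (List String)) (cf : String) (rows cols sx sy dx dy : Int) : List Int → Option (List String)
  | [] => some []
  | i :: is =>
    let px := sx + dx * i
    let py := sy + dy * i
    if 0 ≤ px ∧ px < rows ∧ 0 ≤ py ∧ py < cols then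
      -- in range under Pre_ (rows at least as long as row 0)
      let c := PySem.List.pyGetD (PySem.List.pyGetD grid px []) py "n"
      if c ≠ cf ∧ c ≠ "_" then none
      else (pvB_winGo grid cf rows cols sx sy dx dy is).map (fun cs => c :: cs)
    else none

def pvB_window (grid : List (List String)) (cf : String) (rows cols sx sy dx dy : Int) : Option (List String) :=
  pvB_winGo grid cf rows cols sx sy dx dy (PySem.List.pyRange 0 5 1)

-- inner 'for o in range(5)' of cell_value; none = the early 'return 0'
def pvB_offGo (grid : List (List String)) (cf : String) (rows cols x y dx dy : Int) : List Int → Int → Option Int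
  | [], v => some v
  | o :: os, v =>
    match pvB_window grid cf rows cols (x - dx * o) (y - dy * o) dx dy with
    | some w =>
      if PySem.List.pyGetD (PySem.List.pyGetD grid x []) y "n" = "_" then
        let k : Int := 1 + (w.count cf : Int)
        pvB_offGo grid cf rows cols x y dx dy os (v * (k * k))
      else none
    | none => pvB_offGo grid cf rows cols x y dx dy os v

-- outer 'for dx, dy in dirs' of cell_value
def pvB_dirGo (grid : List (List String)) (cf : String) (rows cols x y : Int) : List (Int × Int) → Int → Option Int
  | [], v => some v
  | d :: ds, v =>
    match pvB_offGo grid cf rows cols x y d.1 d.2 (PySem.List.pyRange 0 5 1) v with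
    | some v' => pvB_dirGo grid cf rows cols x y ds v'
    | none => none

def pvB_cellValue (grid : List (List String)) (cf : String) (rows cols x y : Int) : Int :=
  (pvB_dirGo grid cf rows cols x y ([((1:Int),(1:Int)), (1,0), (1,-1), (0,-1)] : List (Int × Int)) 1).getD 0

def calculate_grid_intersection_values_alt (grid : List (List String)) (calculating_for : String) : List (List Int) :=
  let rows : Int := (grid.length : Int)
  let cols : Int := ((grid.headD []).length : Int)
  (PySem.List.pyRange 0 rows 1).map (fun x =>
    (PySem.List.pyRange 0 cols 1).map (fun y => pvB_cellValue grid calculating_for rows cols x y))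

-- ===== PRECONDITION & SPEC =====
-- Pre_ excludes (a) the empty grid, where A returns [] but B (which reads len(grid[0]) up front) raises
-- IndexError; (b) grids with a row shorter than row 0, on which A raises IndexError; and (c)
-- calculating_for = "n", which collides with A's internal off-grid sentinel 'n', making A treat off-grid
-- cells as player stones so that it either raises IndexError or writes through wrapped negative indices
-- into the opposite edge of the grid — an artefact of the sentinel, not intended behaviour.
def Pre_calculate_grid_intersection_values (grid : List (List String)) (calculating_for : String) : Prop :=
  grid ≠ [] ∧ (∀ row ∈ grid, (grid.headD []).length ≤ row.length) ∧ calculating_for ≠ "n"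
instance (grid : List (List String)) (calculating_for : String) : Decidable (Pre_calculate_grid_intersection_values grid calculating_for) := by
  unfold Pre_calculate_grid_intersection_values; infer_instance

def pvWitness_calculate_grid_intersection_values : List (List String) × String :=
  ([["_", "x"], ["o", "_"]], "x")

def Spec_calculate_grid_intersection_values (grid : List (List String)) (calculating_for : String) (out : List (List Int)) : Prop := out = calculate_grid_intersection_values_alt grid calculating_for
instance (grid : List (List String)) (calculating_for : String) (out : List (List Int)) : Decidable (Spec_calculate_grid_intersection_values grid calculating_for out) := by unfold Spec_calculate_grid_intersection_values; infer_instance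

-- ===== CLAIM (what is proved, stated in full; the proofs are below) =====
def Claim_equal_calculate_grid_intersection_values : Prop := ∀ (grid : List (List String)) (calculating_for : String), Dom_calculate_grid_intersection_values grid calculating_for → Pre_calculate_grid_intersection_values grid calculating_for → Spec_calculate_grid_intersection_values grid calculating_for (calculate_grid_intersection_values grid calculating_for)

-- ===== LEMMAS AND PROOFS =====


-- ---------- proof-side notions ----------

-- reading cell (a,b) of a value grid / of the board (defaults only hit out of range / off Pre_)
def pvVal (vg : List (List Int)) (a b : Int) : Int :=
  PySem.List.pyGetD (PySem.List.pyGetD vg a []) b 0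

def pvShape (vg : List (List Int)) (Rn Cn : Nat) : Prop :=
  vg.length = Rn ∧ ∀ row ∈ vg, row.length = Cn

def pvCell (grid : List (List String)) (x y : Int) : String :=
  PySem.List.pyGetD (PySem.List.pyGetD grid x []) y "n"

def pvInb (R C x y : Int) : Bool :=
  decide (0 ≤ x) && decide (x < R) && decide (0 ≤ y) && decide (y < C)

def pvGood (grid : List (List String)) (cf : String) (R C x y : Int) : Prop :=
  pvInb R C x y ∧ (pvCell grid x y = cf ∨ pvCell grid x y = "_")

def pvOk (grid : List (List String)) (cf : String) (R C x y dx dy : Int) : Bool :=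
  (pvB_window grid cf R C x y dx dy).isSome

def pvK (grid : List (List String)) (cf : String) (R C x y dx dy : Int) : Int :=
  1 + (((pvB_window grid cf R C x y dx dy).getD []).count cf : Int)

def pvCover (x y dx dy a b : Int) : Bool :=
  (PySem.List.pyRange 0 5 1).any (fun i => decide (x + dx * i = a) && decide (y + dy * i = b))

-- the per-window pointwise effect of A's dir-body on cell (a,b)
def pvTr (grid : List (List String)) (cf : String) (R C a b x y dx dy : Int) (v : Int) : Int :=
  if pvOk grid cf R C x y dx dy && pvCover x y dx dy a b then
    (if pvCell grid a b = "_" then v * (pvK grid cf R C x y dx dy * pvK grid cf R C x y dx dy) else 0)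
  else v

-- multiplier contributed by the window starting at (x,y)
def pvC0 (grid : List (List String)) (cf : String) (R C x y dx dy : Int) : Int :=
  if pvOk grid cf R C x y dx dy then pvK grid cf R C x y dx dy * pvK grid cf R C x y dx dy else 1

-- ---------- window characterisation (B side) ----------

theorem pvB_winGo_some_iff (grid : List (List String)) (cf : String) (R C sx sy dx dy : Int)
    (is : List Int) :
    (pvB_winGo grid cf R C sx sy dx dy is).isSome = true ↔
      ∀ i ∈ is, pvGood grid cf R C (sx + dx * i) (sy + dy * i) := by
  induction is with
  | nil => simp [pvB_winGo]
  | cons i is ih =>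
    by_cases hb : 0 ≤ sx + dx * i ∧ sx + dx * i < R ∧ 0 ≤ sy + dy * i ∧ sy + dy * i < C
    · by_cases hc : pvCell grid (sx + dx * i) (sy + dy * i) = cf ∨ pvCell grid (sx + dx * i) (sy + dy * i) = "_"
      · have hc' : ¬ (pvCell grid (sx + dx * i) (sy + dy * i) ≠ cf ∧ pvCell grid (sx + dx * i) (sy + dy * i) ≠ "_") := by tauto
        simp only [pvB_winGo, pvCell] at *
        simp [hb, hc', ih, pvGood, pvInb, pvCell, hc]
      · have hc' : pvCell grid (sx + dx * i) (sy + dy * i) ≠ cf ∧ pvCell grid (sx + dx * i) (sy + dy * i) ≠ "_" := by tauto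
        simp only [pvB_winGo, pvCell] at *
        simp [hb, hc', pvGood, pvCell]
    · simp only [pvB_winGo, pvCell] at *
      simp [hb]
      intro h
      exfalso
      have := h.1
      simp [pvInb] at this
      omega

theorem pvB_winGo_val (grid : List (List String)) (cf : String) (R C sx sy dx dy : Int)
    (is : List Int) (h : ∀ i ∈ is, pvGood grid cf R C (sx + dx * i) (sy + dy * i)) :
    pvB_winGo grid cf R C sx sy dx dy is =
      some (is.map (fun i => pvCell grid (sx + dx * i) (sy + dy * i))) := by
  induction is with
  | nil => simp [pvB_winGo]
  | cons i is ih =>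
    have hg := h i (by simp)
    have hb : 0 ≤ sx + dx * i ∧ sx + dx * i < R ∧ 0 ≤ sy + dy * i ∧ sy + dy * i < C := by
      have := hg.1; simp [pvInb] at this; omega
    have hc' : ¬ (pvCell grid (sx + dx * i) (sy + dy * i) ≠ cf ∧ pvCell grid (sx + dx * i) (sy + dy * i) ≠ "_") := by
      have := hg.2; tauto
    simp only [pvB_winGo, pvCell] at *
    simp [hb, hc', ih (fun j hj => h j (by simp [hj]))]

theorem pvOk_iff (grid : List (List String)) (cf : String) (R C x y dx dy : Int) :
    pvOk grid cf R C x y dx dy ↔ ∀ i ∈ PySem.List.pyRange 0 5 1, pvGood grid cf R C (x + dx * i) (y + dy * i) := by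
  unfold pvOk pvB_window
  exact pvB_winGo_some_iff grid cf R C x y dx dy _

theorem pvOk_inb (grid : List (List String)) (cf : String) (R C x y dx dy : Int)
    (h : pvOk grid cf R C x y dx dy) : pvInb R C x y := by
  have := (pvOk_iff grid cf R C x y dx dy).1 h 0 (by decide)
  simpa using this.1

-- ---------- A's count loop ----------

theorem pvA_countLoop_snd_iff (cf : String) (l : List String) (xc cnt : Int) :
    (pvA_countLoop cf l (xc, cnt)).2 = cnt + l.length ↔ ∀ e ∈ l, e = cf ∨ e = "_" := by
  induction l generalizing xc cnt with
  | nil => simp [pvA_countLoop]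
  | cons e l ih =>
    by_cases he : e = cf
    · have h1 : pvA_countLoop cf (e :: l) (xc, cnt) = pvA_countLoop cf l (xc + 1, cnt + 1) := by
        simp [pvA_countLoop, he]
      have h2 : cnt + ((e :: l).length : Int) = (cnt + 1) + (l.length : Int) := by
        simp; ring
      rw [h1, h2, ih (xc + 1) (cnt + 1)]
      simp [he]
    · by_cases hu : e = "_"
      · subst hu
        have h1 : pvA_countLoop cf ("_" :: l) (xc, cnt) = pvA_countLoop cf l (xc, cnt + 1) := by
          simp [pvA_countLoop, he]
        have h2 : cnt + (("_" :: l).length : Int) = (cnt + 1) + (l.length : Int) := by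
          simp; ring
        rw [h1, h2, ih xc (cnt + 1)]
        simp
      · have h1 : pvA_countLoop cf (e :: l) (xc, cnt) = (xc, cnt) := by
          simp [pvA_countLoop, he, hu]
        rw [h1]
        apply iff_of_false
        · have : (0 : Int) ≤ (l.length : Int) := by positivity
          simp
          omega
        · intro hall
          exact absurd (hall e (by simp)) (by tauto)

theorem pvA_countLoop_fst (cf : String) (l : List String) (xc cnt : Int)
    (h : ∀ e ∈ l, e = cf ∨ e = "_") :
    (pvA_countLoop cf l (xc, cnt)).1 = xc + (l.count cf : Int) := by
  induction l generalizing xc cnt with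
  | nil => simp [pvA_countLoop]
  | cons e l ih =>
    by_cases he : e = cf
    · have h1 : pvA_countLoop cf (e :: l) (xc, cnt) = pvA_countLoop cf l (xc + 1, cnt + 1) := by
        simp [pvA_countLoop, he]
      rw [h1, ih (xc + 1) (cnt + 1) (fun f hf => h f (by simp [hf]))]
      have : (e :: l).count cf = l.count cf + 1 := by
        simp [List.count_cons, he]
      rw [this]
      push_cast
      ring
    · have hu : e = "_" := by
        rcases h e (by simp) with h1 | h1
        · exact absurd h1 he
        · exact h1
      subst hu
      have h1 : pvA_countLoop cf ("_" :: l) (xc, cnt) = pvA_countLoop cf l (xc, cnt + 1) := by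
        simp [pvA_countLoop, he]
      rw [h1, ih xc (cnt + 1) (fun f hf => h f (by simp [hf]))]
      have : ("_" :: l).count cf = l.count cf := by
        simp [List.count_cons]
        omega
      rw [this]

-- ---------- the line and the bridge ----------

theorem pv_line_eq (grid : List (List String)) (x y dx dy : Int) :
    get_line_3 grid (x, y) 5 (dx, dy) false =
      (PySem.List.pyRange 0 5 1).map (fun i => get_of_grid_3 grid (x + dx * i, y + dy * i)) := by
  unfold get_line_3
  simp only [Bool.false_eq_true, if_false]
  exact PySem.List.foldl_append_singleton_eq_map _ _ _

theorem pv_item_eq (grid : List (List String)) (x y : Int) :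
    get_of_grid_3 grid (x, y) =
      if pvInb (grid.length : Int) ((grid.headD []).length : Int) x y then pvCell grid x y else "n" := by
  unfold get_of_grid_3 pvCell pvInb
  split_ifs with h1 h2 h2 <;> first
  | rfl
  | (exfalso; simp at h1 h2 <;> omega)

theorem pv_item_good_iff (grid : List (List String)) (cf : String) (hcf : cf ≠ "n") (x y : Int) :
    (get_of_grid_3 grid (x, y) = cf ∨ get_of_grid_3 grid (x, y) = "_") ↔
      pvGood grid cf (grid.length : Int) ((grid.headD []).length : Int) x y := by
  rw [pv_item_eq]
  unfold pvGood
  constructor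
  · intro hc
    split_ifs at hc with h
    · exact ⟨h, hc⟩
    · exfalso
      rcases hc with hc | hc
      · exact hcf hc.symm
      · exact absurd hc (by decide)
  · rintro ⟨h, hc⟩
    rw [if_pos h]
    exact hc

theorem pv_cnt_iff (grid : List (List String)) (cf : String) (hcf : cf ≠ "n") (x y dx dy : Int) :
    (pvA_countLoop cf (get_line_3 grid (x, y) 5 (dx, dy) false) (1, 0)).2 = 5 ↔
      pvOk grid cf (grid.length : Int) ((grid.headD []).length : Int) x y dx dy := by
  rw [pv_line_eq]
  have hlen : ((((PySem.List.pyRange 0 5 1).map (fun i => get_of_grid_3 grid (x + dx * i, y + dy * i))).length : Nat) : Int) = 5 := by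
    rw [List.length_map]
    rw [show (PySem.List.pyRange 0 5 1).length = 5 from by decide]
    decide
  have hiff := pvA_countLoop_snd_iff cf ((PySem.List.pyRange 0 5 1).map (fun i => get_of_grid_3 grid (x + dx * i, y + dy * i))) 1 0
  rw [hlen] at hiff
  norm_num at hiff
  rw [hiff, pvOk_iff]
  constructor
  · intro h i hi
    have hb := PySem.List.mem_pyRange_one.1 hi
    exact (pv_item_good_iff grid cf hcf _ _).1 (h _ i hb.1 hb.2 rfl)
  · intro h e i h0 h5' he
    rw [← he]
    exact (pv_item_good_iff grid cf hcf _ _).2 (h i (PySem.List.mem_pyRange_one.2 ⟨h0, h5'⟩))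

theorem pv_map_item_eq_map_cell (grid : List (List String)) (cf : String) (x y dx dy : Int)
    (hall : ∀ i ∈ PySem.List.pyRange 0 5 1,
      pvGood grid cf (grid.length : Int) ((grid.headD []).length : Int) (x + dx * i) (y + dy * i)) :
    (PySem.List.pyRange 0 5 1).map (fun i => get_of_grid_3 grid (x + dx * i, y + dy * i)) =
      (PySem.List.pyRange 0 5 1).map (fun i => pvCell grid (x + dx * i) (y + dy * i)) := by
  apply List.map_congr_left
  intro i hi
  rw [pv_item_eq, if_pos (hall i hi).1]

theorem pv_window_eq (grid : List (List String)) (cf : String) (x y dx dy : Int)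
    (h : pvOk grid cf (grid.length : Int) ((grid.headD []).length : Int) x y dx dy) :
    pvB_window grid cf (grid.length : Int) ((grid.headD []).length : Int) x y dx dy =
      some ((PySem.List.pyRange 0 5 1).map (fun i => pvCell grid (x + dx * i) (y + dy * i))) := by
  unfold pvB_window
  exact pvB_winGo_val grid cf _ _ x y dx dy _ ((pvOk_iff grid cf _ _ x y dx dy).1 h)

theorem pv_xcount_eq (grid : List (List String)) (cf : String) (hcf : cf ≠ "n") (x y dx dy : Int)
    (h : pvOk grid cf (grid.length : Int) ((grid.headD []).length : Int) x y dx dy) :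
    (pvA_countLoop cf (get_line_3 grid (x, y) 5 (dx, dy) false) (1, 0)).1 =
      pvK grid cf (grid.length : Int) ((grid.headD []).length : Int) x y dx dy := by
  have hall := (pvOk_iff grid cf _ _ x y dx dy).1 h
  have hgood : ∀ e ∈ (PySem.List.pyRange 0 5 1).map (fun i => get_of_grid_3 grid (x + dx * i, y + dy * i)), e = cf ∨ e = "_" := by
    simp only [List.forall_mem_map]
    intro i hi
    exact (pv_item_good_iff grid cf hcf _ _).2 (hall i hi)
  rw [pv_line_eq, pvA_countLoop_fst cf _ 1 0 hgood]
  unfold pvK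
  rw [pv_window_eq grid cf x y dx dy h]
  rw [pv_map_item_eq_map_cell grid cf x y dx dy hall]
  simp

-- ---------- cell updates, pointwise ----------

theorem pv_rowlen (vg : List (List Int)) (Rn Cn : Nat) (h : pvShape vg Rn Cn)
    (xi : Int) (hx : 0 ≤ xi ∧ xi < (Rn : Int)) :
    (PySem.List.pyGetD vg xi []).length = Cn := by
  obtain ⟨hlen, hrow⟩ := h
  have hx' : xi.toNat < vg.length := by omega
  rw [PySem.List.pyGetD_of_nonneg vg [] hx.1]
  rw [List.getD_eq_getElem?_getD, List.getElem?_eq_getElem hx']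
  exact hrow _ (List.getElem_mem hx')

theorem pv_shape_setCell (vg : List (List Int)) (Rn Cn : Nat) (h : pvShape vg Rn Cn)
    (xi yi v : Int) (hx : 0 ≤ xi ∧ xi < (Rn : Int)) (hy : 0 ≤ yi ∧ yi < (Cn : Int)) :
    pvShape (pvA_setCell vg xi yi v) Rn Cn := by
  have hrl := pv_rowlen vg Rn Cn h xi hx
  obtain ⟨hlen, hrow⟩ := h
  unfold pvA_setCell
  rw [PySem.List.pySetD_of_nonneg vg _ hx.1]
  constructor
  · rw [List.length_set]; exact hlen
  · intro row hrowmem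
    rcases List.mem_or_eq_of_mem_set hrowmem with hm | hm
    · exact hrow row hm
    · rw [hm, PySem.List.length_pySetD]
      exact hrl

theorem pv_val_setCell (vg : List (List Int)) (Rn Cn : Nat) (h : pvShape vg Rn Cn)
    (xi yi v a b : Int) (hx : 0 ≤ xi ∧ xi < (Rn : Int)) (hy : 0 ≤ yi ∧ yi < (Cn : Int))
    (ha : 0 ≤ a) (hb : 0 ≤ b) :
    pvVal (pvA_setCell vg xi yi v) a b = if a = xi ∧ b = yi then v else pvVal vg a b := by
  have hrl := pv_rowlen vg Rn Cn h xi hx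
  obtain ⟨hlen, hrow⟩ := h
  have hx' : xi.toNat < vg.length := by omega
  have hy' : yi.toNat < (PySem.List.pyGetD vg xi []).length := by omega
  have hxi : xi = ((xi.toNat : Nat) : Int) := by omega
  have hyi : yi = ((yi.toNat : Nat) : Int) := by omega
  have hai : a = ((a.toNat : Nat) : Int) := by omega
  have hbi : b = ((b.toNat : Nat) : Int) := by omega
  unfold pvVal pvA_setCell
  rw [hxi, hai, hbi]
  rw [PySem.List.pyGetD_pySetD_natCast vg xi.toNat a.toNat _ [] hx']
  by_cases han : a.toNat = xi.toNat
  · rw [if_pos han]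
    have hy'' : yi.toNat < (PySem.List.pyGetD vg ((xi.toNat : Nat) : Int) []).length := by
      rw [← hxi]; exact hy'
    rw [hyi, PySem.List.pyGetD_pySetD_natCast _ yi.toNat b.toNat _ 0 hy'']
    by_cases hbn : b.toNat = yi.toNat
    · rw [if_pos hbn, if_pos ⟨by omega, by omega⟩]
    · rw [if_neg hbn, if_neg (by intro hc; omega)]
      rw [show ((a.toNat : Nat) : Int) = ((xi.toNat : Nat) : Int) by omega]
  · rw [if_neg han, if_neg (by intro hc; omega)]

theorem pv_val_mulCell (vg : List (List Int)) (Rn Cn : Nat) (h : pvShape vg Rn Cn)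
    (xi yi m a b : Int) (hx : 0 ≤ xi ∧ xi < (Rn : Int)) (hy : 0 ≤ yi ∧ yi < (Cn : Int))
    (ha : 0 ≤ a) (hb : 0 ≤ b) :
    pvVal (pvA_mulCell vg xi yi m) a b = if a = xi ∧ b = yi then pvVal vg xi yi * m else pvVal vg a b := by
  unfold pvA_mulCell
  rw [pv_val_setCell vg Rn Cn h _ _ _ a b hx hy ha hb]
  rfl

theorem pv_shape_mulCell (vg : List (List Int)) (Rn Cn : Nat) (h : pvShape vg Rn Cn)
    (xi yi m : Int) (hx : 0 ≤ xi ∧ xi < (Rn : Int)) (hy : 0 ≤ yi ∧ yi < (Cn : Int)) :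
    pvShape (pvA_mulCell vg xi yi m) Rn Cn := by
  unfold pvA_mulCell
  exact pv_shape_setCell vg Rn Cn h _ _ _ hx hy

-- ---------- generic pointwise fold ----------

theorem pv_foldl_val {α : Type} (a b : Int) (Rn Cn : Nat) (L : List α)
    (f : List (List Int) → α → List (List Int)) (g : α → Int → Int)
    (h : ∀ vg l, l ∈ L → pvShape vg Rn Cn →
        pvShape (f vg l) Rn Cn ∧ pvVal (f vg l) a b = g l (pvVal vg a b))
    (vg : List (List Int)) (hsh : pvShape vg Rn Cn) :
    pvShape (L.foldl f vg) Rn Cn ∧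
      pvVal (L.foldl f vg) a b = L.foldl (fun v l => g l v) (pvVal vg a b) := by
  induction L generalizing vg with
  | nil => exact ⟨hsh, rfl⟩
  | cons l L ih =>
    have hl := h vg l (by simp) hsh
    have := ih (fun vg' l' hl' hsh' => h vg' l' (by simp [hl']) hsh') (f vg l) hl.1
    simp only [List.foldl_cons]
    rw [this.2, hl.2]
    exact ⟨this.1, rfl⟩

-- ---------- fold helpers on Int accumulators ----------

theorem pv_foldl_mul (L : List Int) (c : Int → Int) (v : Int) :
    L.foldl (fun v l => v * c l) v = v * (L.map c).prod := by
  induction L generalizing v with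
  | nil => simp
  | cons l L ih => simp [ih, mul_assoc]

theorem pv_foldl_mul_pair (L : List (Int × Int)) (c : Int × Int → Int) (v : Int) :
    L.foldl (fun v l => v * c l) v = v * (L.map c).prod := by
  induction L generalizing v with
  | nil => simp
  | cons l L ih => simp [ih, mul_assoc]

theorem pv_foldl_zero {α : Type} (p : α → Prop) [DecidablePred p] (L : List α) (v : Int) :
    L.foldl (fun v l => if p l then (0 : Int) else v) v = if ∃ l ∈ L, p l then 0 else v := by
  induction L generalizing v with
  | nil => simp
  | cons l L ih =>
    simp only [List.foldl_cons]
    by_cases hl : p l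
    · rw [if_pos hl, ih, if_pos (show ∃ x ∈ l :: L, p x from ⟨l, by simp, hl⟩)]
      split_ifs <;> rfl
    · rw [if_neg hl, ih]
      have hiff : (∃ x ∈ l :: L, p x) ↔ (∃ x ∈ L, p x) := by
        constructor
        · rintro ⟨x, hx, hpx⟩
          rcases List.mem_cons.1 hx with h1 | h1
          · exact absurd (h1 ▸ hpx) hl
          · exact ⟨x, h1, hpx⟩
        · rintro ⟨x, hx, hpx⟩
          exact ⟨x, by simp [hx], hpx⟩
      rw [if_congr hiff rfl rfl]

theorem pv_prod_prod_comm {α β : Type} (L : List α) (M : List β) (f : α → β → Int) :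
    ((L.map (fun x => ((M.map (f x)).prod))).prod) =
      ((M.map (fun o => ((L.map (fun x => f x o)).prod))).prod) := by
  induction L with
  | nil => simp
  | cons l L ih =>
    simp only [List.map_cons, List.prod_cons, ih]
    rw [← List.prod_map_mul]

theorem pv_prod_ite_range (m : Nat) (β : Int) (t : Int) (Q : Prop) [Decidable Q] :
    (((PySem.List.pyRange 0 (m : Int) 1).map (fun y => if y = β ∧ Q then t else 1)).prod) =
      if (0 ≤ β ∧ β < (m : Int)) ∧ Q then t else 1 := by
  induction m with
  | zero => simp
  | succ m ih =>
    rw [show ((m + 1 : Nat) : Int) = (m : Int) + 1 by push_cast; ring]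
    rw [PySem.List.pyRange_one_succ_right (by positivity)]
    rw [List.map_append, List.prod_append, ih]
    simp only [List.map_cons, List.map_nil, List.prod_cons, List.prod_nil]
    by_cases hq : Q
    · by_cases hm : β = (m : Int)
      · rw [if_neg (fun hc => absurd hc.1 (by omega)), if_pos ⟨hm.symm, hq⟩, if_pos ⟨⟨by omega, by omega⟩, hq⟩]
        ring
      · by_cases hin : 0 ≤ β ∧ β < (m : Int)
        · rw [if_pos ⟨hin, hq⟩, if_neg (fun hc => absurd hc.1 (by omega)), if_pos ⟨⟨by omega, by omega⟩, hq⟩]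
          ring
        · rw [if_neg (fun hc => absurd hc.1 (by tauto)), if_neg (fun hc => absurd hc.1 (by omega)), if_neg (fun hc => absurd hc.1 (by omega))]
          ring
    · rw [if_neg (by tauto), if_neg (by tauto), if_neg (by tauto)]
      ring

theorem pv_prod_single (L : List Int) (hL : L.Nodup) (p : Int → Prop) [DecidablePred p]
    (t : Int → Int) (o0 : Int) (h0 : o0 ∈ L) (hp : p o0) (huniq : ∀ o ∈ L, p o → o = o0) :
    ((L.map (fun o => if p o then t o else 1)).prod) = t o0 := by
  induction L with
  | nil => simp at h0
  | cons l L ih =>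
    simp only [List.map_cons, List.prod_cons]
    rcases List.mem_cons.1 h0 with h1 | h1
    · subst h1
      rw [if_pos hp]
      have hnone : ∀ o ∈ L, ¬ p o := by
        intro o ho hpo
        have := huniq o (by simp [ho]) hpo
        subst this
        exact (List.nodup_cons.1 hL).1 ho
      have : (L.map (fun o => if p o then t o else 1)).prod = 1 := by
        apply List.prod_eq_one
        intro x hx
        rcases List.mem_map.1 hx with ⟨o, ho, rfl⟩
        rw [if_neg (hnone o ho)]
      rw [this, mul_one]
    · have hln : ¬ p l := by
        intro hpl
        have := huniq l (by simp) hpl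
        subst this
        exact (List.nodup_cons.1 hL).1 h1
      rw [if_neg hln, one_mul]
      exact ih (List.nodup_cons.1 hL).2 h1 (fun o ho hpo => huniq o (by simp [ho]) hpo)


-- ---------- the write phase, pointwise ----------

theorem pv_pos_inj (x y dx dy a b i j : Int) (hnz : ¬(dx = 0 ∧ dy = 0))
    (h1 : x + dx * i = a ∧ y + dy * i = b) (h2 : x + dx * j = a ∧ y + dy * j = b) : i = j := by
  have hdx : dx * (i - j) = 0 := by have := h1.1; have := h2.1; ring_nf; nlinarith [h1.1, h2.1]
  have hdy : dy * (i - j) = 0 := by nlinarith [h1.2, h2.2]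
  rcases mul_eq_zero.1 hdx with h | h
  · rcases mul_eq_zero.1 hdy with h' | h'
    · exact absurd ⟨h, h'⟩ hnz
    · omega
  · omega

theorem pv_writeFold (grid : List (List String)) (cf : String) (x y dx dy K a b : Int)
    (hnz : ¬(dx = 0 ∧ dy = 0))
    (hok : pvOk grid cf (grid.length : Int) ((grid.headD []).length : Int) x y dx dy)
    (ha : 0 ≤ a) (hb : 0 ≤ b)
    (is : List Int) (hsub : ∀ i ∈ is, 0 ≤ i ∧ i < 5) (hnd : is.Nodup)
    (vg : List (List Int)) (hsh : pvShape vg grid.length (grid.headD []).length) :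
    pvShape (is.foldl (fun vg i =>
        if PySem.List.pyGetD (get_line_3 grid (x, y) 5 (dx, dy) false) i "" = "_" then
          pvA_mulCell (pvA_mulCell vg (x + dx * i) (y + dy * i) K) (x + dx * i) (y + dy * i) K
        else
          pvA_setCell vg (x + dx * i) (y + dy * i) 0) vg) grid.length (grid.headD []).length ∧
      pvVal (is.foldl (fun vg i =>
        if PySem.List.pyGetD (get_line_3 grid (x, y) 5 (dx, dy) false) i "" = "_" then
          pvA_mulCell (pvA_mulCell vg (x + dx * i) (y + dy * i) K) (x + dx * i) (y + dy * i) K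
        else
          pvA_setCell vg (x + dx * i) (y + dy * i) 0) vg) a b =
        (if ∃ i ∈ is, x + dx * i = a ∧ y + dy * i = b then
          (if pvCell grid a b = "_" then pvVal vg a b * (K * K) else 0)
        else pvVal vg a b) := by
  have hall := (pvOk_iff grid cf _ _ x y dx dy).1 hok
  have hline : ∀ i : Int, 0 ≤ i → i < 5 →
      PySem.List.pyGetD (get_line_3 grid (x, y) 5 (dx, dy) false) i "" = pvCell grid (x + dx * i) (y + dy * i) := by
    intro i h0 h5
    rw [pv_line_eq]
    rw [PySem.List.pyGetD_map_pyRange_of_nonneg _ 5 i "" h0 h5]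
    rw [pv_item_eq, if_pos (hall i (PySem.List.mem_pyRange_one.2 ⟨h0, h5⟩)).1]
  have hinb : ∀ i : Int, 0 ≤ i → i < 5 →
      (0 ≤ x + dx * i ∧ x + dx * i < (grid.length : Int)) ∧
      (0 ≤ y + dy * i ∧ y + dy * i < ((grid.headD []).length : Int)) := by
    intro i h0 h5
    have := (hall i (PySem.List.mem_pyRange_one.2 ⟨h0, h5⟩)).1
    simp [pvInb] at this
    simp only [List.headD_eq_head?_getD]
    omega
  induction is generalizing vg with
  | nil =>
    refine ⟨hsh, ?_⟩
    simp
  | cons i is ih =>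
    have hi5 := hsub i (by simp)
    have hbnd := hinb i hi5.1 hi5.2
    have hlinei := hline i hi5.1 hi5.2
    simp only [List.foldl_cons]
    set p := fun vg (i : Int) =>
        if PySem.List.pyGetD (get_line_3 grid (x, y) 5 (dx, dy) false) i "" = "_" then
          pvA_mulCell (pvA_mulCell vg (x + dx * i) (y + dy * i) K) (x + dx * i) (y + dy * i) K
        else
          pvA_setCell vg (x + dx * i) (y + dy * i) 0 with hp
    have hshstep : pvShape (p vg i) grid.length (grid.headD []).length := by
      rw [hp]
      by_cases hu : PySem.List.pyGetD (get_line_3 grid (x, y) 5 (dx, dy) false) i "" = "_"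
      · simp only [if_pos hu]
        exact pv_shape_mulCell _ _ _ (pv_shape_mulCell _ _ _ hsh _ _ _ hbnd.1 hbnd.2) _ _ _ hbnd.1 hbnd.2
      · simp only [if_neg hu]
        exact pv_shape_setCell _ _ _ hsh _ _ _ hbnd.1 hbnd.2
    have hrec := ih (fun j hj => hsub j (by simp [hj])) (List.nodup_cons.1 hnd).2 (p vg i) hshstep
    refine ⟨hrec.1, ?_⟩
    rw [hrec.2]
    by_cases hhit : x + dx * i = a ∧ y + dy * i = b
    · have hnohit : ¬ ∃ j ∈ is, x + dx * j = a ∧ y + dy * j = b := by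
        rintro ⟨j, hj, hjh⟩
        have := pv_pos_inj x y dx dy a b i j hnz hhit hjh
        subst this
        exact (List.nodup_cons.1 hnd).1 hj
      rw [if_neg hnohit, if_pos ⟨i, by simp, hhit⟩]
      have hcellab : pvCell grid (x + dx * i) (y + dy * i) = pvCell grid a b := by
        rw [hhit.1, hhit.2]
      by_cases hu : pvCell grid a b = "_"
      · have hu' : PySem.List.pyGetD (get_line_3 grid (x, y) 5 (dx, dy) false) i "" = "_" := by
          rw [hlinei, hcellab]; exact hu
        rw [hp]
        simp only [if_pos hu', if_pos hu]
        rw [pv_val_mulCell _ _ _ (pv_shape_mulCell _ _ _ hsh _ _ _ hbnd.1 hbnd.2) _ _ _ a b hbnd.1 hbnd.2 ha hb]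
        rw [if_pos ⟨hhit.1.symm, hhit.2.symm⟩]
        rw [pv_val_mulCell _ _ _ hsh _ _ _ (x + dx * i) (y + dy * i) hbnd.1 hbnd.2 (by omega) (by omega)]
        rw [if_pos ⟨rfl, rfl⟩]
        rw [hhit.1, hhit.2]
        ring
      · have hu' : ¬ PySem.List.pyGetD (get_line_3 grid (x, y) 5 (dx, dy) false) i "" = "_" := by
          rw [hlinei, hcellab]; exact hu
        rw [hp]
        simp only [if_neg hu', if_neg hu]
        rw [pv_val_setCell _ _ _ hsh _ _ _ a b hbnd.1 hbnd.2 ha hb]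
        rw [if_pos ⟨hhit.1.symm, hhit.2.symm⟩]
    · have hvalstep : pvVal (p vg i) a b = pvVal vg a b := by
        rw [hp]
        by_cases hu : PySem.List.pyGetD (get_line_3 grid (x, y) 5 (dx, dy) false) i "" = "_"
        · simp only [if_pos hu]
          rw [pv_val_mulCell _ _ _ (pv_shape_mulCell _ _ _ hsh _ _ _ hbnd.1 hbnd.2) _ _ _ a b hbnd.1 hbnd.2 ha hb]
          rw [if_neg (fun hc => hhit ⟨hc.1.symm, hc.2.symm⟩)]
          rw [pv_val_mulCell _ _ _ hsh _ _ _ a b hbnd.1 hbnd.2 ha hb]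
          rw [if_neg (fun hc => hhit ⟨hc.1.symm, hc.2.symm⟩)]
        · simp only [if_neg hu]
          rw [pv_val_setCell _ _ _ hsh _ _ _ a b hbnd.1 hbnd.2 ha hb]
          rw [if_neg (fun hc => hhit ⟨hc.1.symm, hc.2.symm⟩)]
      rw [hvalstep]
      have hiff : (∃ j ∈ i :: is, x + dx * j = a ∧ y + dy * j = b) ↔ (∃ j ∈ is, x + dx * j = a ∧ y + dy * j = b) := by
        constructor
        · rintro ⟨j, hj, hjh⟩
          rcases List.mem_cons.1 hj with h1 | h1
          · exact absurd (h1 ▸ hjh) hhit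
          · exact ⟨j, h1, hjh⟩
        · rintro ⟨j, hj, hjh⟩
          exact ⟨j, by simp [hj], hjh⟩
      rw [if_congr hiff rfl rfl]


theorem pv_cover_iff (x y dx dy a b : Int) :
    pvCover x y dx dy a b = true ↔ ∃ i ∈ PySem.List.pyRange 0 5 1, x + dx * i = a ∧ y + dy * i = b := by
  simp [pvCover]

theorem pv_K_ne_zero (grid : List (List String)) (cf : String) (R C x y dx dy : Int) :
    pvK grid cf R C x y dx dy ≠ 0 := by
  unfold pvK
  have : (0 : Int) ≤ (((pvB_window grid cf R C x y dx dy).getD []).count cf : Int) := by positivity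
  omega

theorem pv_dirBody (grid : List (List String)) (cf : String) (hcf : cf ≠ "n")
    (x y dx dy a b : Int) (hnz : ¬(dx = 0 ∧ dy = 0)) (ha : 0 ≤ a) (hb : 0 ≤ b)
    (vg : List (List Int)) (hsh : pvShape vg grid.length (grid.headD []).length) :
    pvShape (if (pvA_countLoop cf (get_line_3 grid (x, y) 5 (dx, dy) false) (1, 0)).2 = 5 ∧
          (pvA_countLoop cf (get_line_3 grid (x, y) 5 (dx, dy) false) (1, 0)).1 ≠ 0 then
        (PySem.List.pyRange 0 5 1).foldl (fun vg i =>
          if PySem.List.pyGetD (get_line_3 grid (x, y) 5 (dx, dy) false) i "" = "_" then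
            pvA_mulCell (pvA_mulCell vg (x + dx * i) (y + dy * i)
                (pvA_countLoop cf (get_line_3 grid (x, y) 5 (dx, dy) false) (1, 0)).1)
              (x + dx * i) (y + dy * i)
              (pvA_countLoop cf (get_line_3 grid (x, y) 5 (dx, dy) false) (1, 0)).1
          else
            pvA_setCell vg (x + dx * i) (y + dy * i) 0) vg
      else vg) grid.length (grid.headD []).length ∧
    pvVal (if (pvA_countLoop cf (get_line_3 grid (x, y) 5 (dx, dy) false) (1, 0)).2 = 5 ∧
          (pvA_countLoop cf (get_line_3 grid (x, y) 5 (dx, dy) false) (1, 0)).1 ≠ 0 then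
        (PySem.List.pyRange 0 5 1).foldl (fun vg i =>
          if PySem.List.pyGetD (get_line_3 grid (x, y) 5 (dx, dy) false) i "" = "_" then
            pvA_mulCell (pvA_mulCell vg (x + dx * i) (y + dy * i)
                (pvA_countLoop cf (get_line_3 grid (x, y) 5 (dx, dy) false) (1, 0)).1)
              (x + dx * i) (y + dy * i)
              (pvA_countLoop cf (get_line_3 grid (x, y) 5 (dx, dy) false) (1, 0)).1
          else
            pvA_setCell vg (x + dx * i) (y + dy * i) 0) vg
      else vg) a b =
      pvTr grid cf (grid.length : Int) ((grid.headD []).length : Int) a b x y dx dy (pvVal vg a b) := by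
  by_cases h5 : (pvA_countLoop cf (get_line_3 grid (x, y) 5 (dx, dy) false) (1, 0)).2 = 5
  · have hok : pvOk grid cf (grid.length : Int) ((grid.headD []).length : Int) x y dx dy :=
      (pv_cnt_iff grid cf hcf x y dx dy).1 h5
    have hK := pv_xcount_eq grid cf hcf x y dx dy hok
    have hKne : (pvA_countLoop cf (get_line_3 grid (x, y) 5 (dx, dy) false) (1, 0)).1 ≠ 0 := by
      rw [hK]; exact pv_K_ne_zero grid cf _ _ x y dx dy
    rw [if_pos ⟨h5, hKne⟩]
    have hw := pv_writeFold grid cf x y dx dy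
      ((pvA_countLoop cf (get_line_3 grid (x, y) 5 (dx, dy) false) (1, 0)).1) a b hnz hok ha hb
      (PySem.List.pyRange 0 5 1) (fun i hi => PySem.List.mem_pyRange_one.1 hi)
      (PySem.List.nodup_pyRange_one 0 5) vg hsh
    refine ⟨hw.1, ?_⟩
    rw [hw.2]
    unfold pvTr
    by_cases hcov : ∃ i ∈ PySem.List.pyRange 0 5 1, x + dx * i = a ∧ y + dy * i = b
    · have hcond : (pvOk grid cf (grid.length : Int) ((grid.headD []).length : Int) x y dx dy &&
          pvCover x y dx dy a b) = true := by
        rw [Bool.and_eq_true]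
        exact ⟨hok, (pv_cover_iff x y dx dy a b).2 hcov⟩
      rw [if_pos hcov, if_pos hcond, hK]
    · have hcond : ¬ ((pvOk grid cf (grid.length : Int) ((grid.headD []).length : Int) x y dx dy &&
          pvCover x y dx dy a b) = true) := by
        rw [Bool.and_eq_true]
        rintro ⟨-, hc⟩
        exact hcov ((pv_cover_iff x y dx dy a b).1 hc)
      rw [if_neg hcov, if_neg hcond]
  · rw [if_neg (fun hc => h5 hc.1)]
    refine ⟨hsh, ?_⟩
    unfold pvTr
    have hnok : pvOk grid cf (grid.length : Int) ((grid.headD []).length : Int) x y dx dy = false := by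
      rcases Bool.eq_false_or_eq_true (pvOk grid cf (grid.length : Int) ((grid.headD []).length : Int) x y dx dy) with h | h
      · exact absurd ((pv_cnt_iff grid cf hcf x y dx dy).2 h) h5
      · exact h
    rw [hnok]
    simp


-- ---------- A assembled pointwise ----------

theorem pv_init_form (grid : List (List String)) :
    ((PySem.List.pyRange 0 (grid.length : Int) 1).foldl
        (fun vg _x => vg ++ [PySem.List.pyRepeat [(1 : Int)] ((grid.headD []).length : Int)]) []) =
      (PySem.List.pyRange 0 (grid.length : Int) 1).map
        (fun _x => List.replicate (grid.headD []).length (1 : Int)) := by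
  rw [PySem.List.foldl_append_singleton_eq_map
    (f := fun _x : Int => PySem.List.pyRepeat [(1 : Int)] ((grid.headD []).length : Int))]
  simp [PySem.List.pyRepeat_singleton]

theorem pv_init_shape (grid : List (List String)) :
    pvShape ((PySem.List.pyRange 0 (grid.length : Int) 1).foldl
        (fun vg _x => vg ++ [PySem.List.pyRepeat [(1 : Int)] ((grid.headD []).length : Int)]) [])
      grid.length (grid.headD []).length := by
  rw [pv_init_form]
  constructor
  · rw [List.length_map, PySem.List.length_pyRange_one]
    omega
  · intro row hrow
    rcases List.mem_map.1 hrow with ⟨_, _, rfl⟩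
    exact List.length_replicate

theorem pv_init_val (grid : List (List String)) (a b : Int)
    (ha : 0 ≤ a) (haR : a < (grid.length : Int)) (hb : 0 ≤ b) (hbC : b < ((grid.headD []).length : Int)) :
    pvVal ((PySem.List.pyRange 0 (grid.length : Int) 1).foldl
        (fun vg _x => vg ++ [PySem.List.pyRepeat [(1 : Int)] ((grid.headD []).length : Int)]) []) a b = 1 := by
  rw [pv_init_form]
  unfold pvVal
  rw [PySem.List.pyGetD_map_pyRange_of_nonneg _ _ a [] ha haR]
  rw [PySem.List.pyGetD_eq_getElem _ 0 hb (by rw [List.length_replicate]; omega)]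
  exact List.getElem_replicate _

set_option maxHeartbeats 2000000 in
theorem pv_A_val_full (grid : List (List String)) (cf : String) (hcf : cf ≠ "n") (a b : Int)
    (ha : 0 ≤ a) (haR : a < (grid.length : Int)) (hb : 0 ≤ b) (hbC : b < ((grid.headD []).length : Int)) :
    pvShape (calculate_grid_intersection_values grid cf) grid.length (grid.headD []).length ∧
    pvVal (calculate_grid_intersection_values grid cf) a b =
      (PySem.List.pyRange 0 (grid.length : Int) 1).foldl (fun v x =>
        (PySem.List.pyRange 0 ((grid.headD []).length : Int) 1).foldl (fun v y =>
          ([((1:Int),(1:Int)), (1,0), (1,-1), (0,-1)] : List (Int × Int)).foldl (fun v d =>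
            pvTr grid cf (grid.length : Int) ((grid.headD []).length : Int) a b x y d.1 d.2 v) v) v) 1 := by
  have hdprop : ∀ (x y : Int) (vg : List (List Int)) (dir : Int × Int),
      dir ∈ ([((1:Int),(1:Int)), (1,0), (1,-1), (0,-1)] : List (Int × Int)) →
      pvShape vg grid.length (grid.headD []).length →
      pvShape ((fun vg (dir : Int × Int) =>
          if (pvA_countLoop cf (get_line_3 grid (x, y) 5 dir false) (1, 0)).2 = 5 ∧
              (pvA_countLoop cf (get_line_3 grid (x, y) 5 dir false) (1, 0)).1 ≠ 0 then
            (PySem.List.pyRange 0 5 1).foldl (fun vg i =>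
              if PySem.List.pyGetD (get_line_3 grid (x, y) 5 dir false) i "" = "_" then
                pvA_mulCell (pvA_mulCell vg (x + dir.1 * i) (y + dir.2 * i)
                    (pvA_countLoop cf (get_line_3 grid (x, y) 5 dir false) (1, 0)).1)
                  (x + dir.1 * i) (y + dir.2 * i)
                  (pvA_countLoop cf (get_line_3 grid (x, y) 5 dir false) (1, 0)).1
              else
                pvA_setCell vg (x + dir.1 * i) (y + dir.2 * i) 0) vg
          else vg) vg dir) grid.length (grid.headD []).length ∧
        pvVal ((fun vg (dir : Int × Int) =>
          if (pvA_countLoop cf (get_line_3 grid (x, y) 5 dir false) (1, 0)).2 = 5 ∧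
              (pvA_countLoop cf (get_line_3 grid (x, y) 5 dir false) (1, 0)).1 ≠ 0 then
            (PySem.List.pyRange 0 5 1).foldl (fun vg i =>
              if PySem.List.pyGetD (get_line_3 grid (x, y) 5 dir false) i "" = "_" then
                pvA_mulCell (pvA_mulCell vg (x + dir.1 * i) (y + dir.2 * i)
                    (pvA_countLoop cf (get_line_3 grid (x, y) 5 dir false) (1, 0)).1)
                  (x + dir.1 * i) (y + dir.2 * i)
                  (pvA_countLoop cf (get_line_3 grid (x, y) 5 dir false) (1, 0)).1
              else
                pvA_setCell vg (x + dir.1 * i) (y + dir.2 * i) 0) vg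
          else vg) vg dir) a b =
          pvTr grid cf (grid.length : Int) ((grid.headD []).length : Int) a b x y dir.1 dir.2 (pvVal vg a b) := by
    intro x y vg dir hdir hsh
    have hnz : ¬ (dir.1 = 0 ∧ dir.2 = 0) := by
      have : dir = ((1:Int),(1:Int)) ∨ dir = (1,0) ∨ dir = (1,-1) ∨ dir = (0,-1) := by
        simpa using hdir
      rcases this with rfl | rfl | rfl | rfl <;> simp
    obtain ⟨dx, dy⟩ := dir
    exact pv_dirBody grid cf hcf x y dx dy a b hnz ha hb vg hsh
  have hyprop : ∀ (x : Int) (vg : List (List Int)) (y : Int),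
      pvShape vg grid.length (grid.headD []).length →
      pvShape ((fun vg (y : Int) =>
          ([((1:Int),(1:Int)), (1,0), (1,-1), (0,-1)] : List (Int × Int)).foldl (fun vg dir =>
            if (pvA_countLoop cf (get_line_3 grid (x, y) 5 dir false) (1, 0)).2 = 5 ∧
                (pvA_countLoop cf (get_line_3 grid (x, y) 5 dir false) (1, 0)).1 ≠ 0 then
              (PySem.List.pyRange 0 5 1).foldl (fun vg i =>
                if PySem.List.pyGetD (get_line_3 grid (x, y) 5 dir false) i "" = "_" then
                  pvA_mulCell (pvA_mulCell vg (x + dir.1 * i) (y + dir.2 * i)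
                      (pvA_countLoop cf (get_line_3 grid (x, y) 5 dir false) (1, 0)).1)
                    (x + dir.1 * i) (y + dir.2 * i)
                    (pvA_countLoop cf (get_line_3 grid (x, y) 5 dir false) (1, 0)).1
                else
                  pvA_setCell vg (x + dir.1 * i) (y + dir.2 * i) 0) vg
            else vg) vg) vg y) grid.length (grid.headD []).length ∧
        pvVal ((fun vg (y : Int) =>
          ([((1:Int),(1:Int)), (1,0), (1,-1), (0,-1)] : List (Int × Int)).foldl (fun vg dir =>
            if (pvA_countLoop cf (get_line_3 grid (x, y) 5 dir false) (1, 0)).2 = 5 ∧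
                (pvA_countLoop cf (get_line_3 grid (x, y) 5 dir false) (1, 0)).1 ≠ 0 then
              (PySem.List.pyRange 0 5 1).foldl (fun vg i =>
                if PySem.List.pyGetD (get_line_3 grid (x, y) 5 dir false) i "" = "_" then
                  pvA_mulCell (pvA_mulCell vg (x + dir.1 * i) (y + dir.2 * i)
                      (pvA_countLoop cf (get_line_3 grid (x, y) 5 dir false) (1, 0)).1)
                    (x + dir.1 * i) (y + dir.2 * i)
                    (pvA_countLoop cf (get_line_3 grid (x, y) 5 dir false) (1, 0)).1
                else
                  pvA_setCell vg (x + dir.1 * i) (y + dir.2 * i) 0) vg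
            else vg) vg) vg y) a b =
          ([((1:Int),(1:Int)), (1,0), (1,-1), (0,-1)] : List (Int × Int)).foldl (fun v d =>
            pvTr grid cf (grid.length : Int) ((grid.headD []).length : Int) a b x y d.1 d.2 v) (pvVal vg a b) := by
    intro x vg y hsh
    exact pv_foldl_val (α := Int × Int) a b grid.length (grid.headD []).length _ _
      (fun d v => pvTr grid cf (grid.length : Int) ((grid.headD []).length : Int) a b x y d.1 d.2 v)
      (fun vg dir hdir hsh' => hdprop x y vg dir hdir hsh') vg hsh
  have hxprop : ∀ (vg : List (List Int)) (x : Int),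
      pvShape vg grid.length (grid.headD []).length →
      pvShape ((fun vg (x : Int) =>
          (PySem.List.pyRange 0 ((grid.headD []).length : Int) 1).foldl (fun vg y =>
            ([((1:Int),(1:Int)), (1,0), (1,-1), (0,-1)] : List (Int × Int)).foldl (fun vg dir =>
              if (pvA_countLoop cf (get_line_3 grid (x, y) 5 dir false) (1, 0)).2 = 5 ∧
                  (pvA_countLoop cf (get_line_3 grid (x, y) 5 dir false) (1, 0)).1 ≠ 0 then
                (PySem.List.pyRange 0 5 1).foldl (fun vg i =>
                  if PySem.List.pyGetD (get_line_3 grid (x, y) 5 dir false) i "" = "_" then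
                    pvA_mulCell (pvA_mulCell vg (x + dir.1 * i) (y + dir.2 * i)
                        (pvA_countLoop cf (get_line_3 grid (x, y) 5 dir false) (1, 0)).1)
                      (x + dir.1 * i) (y + dir.2 * i)
                      (pvA_countLoop cf (get_line_3 grid (x, y) 5 dir false) (1, 0)).1
                  else
                    pvA_setCell vg (x + dir.1 * i) (y + dir.2 * i) 0) vg
              else vg) vg) vg) vg x) grid.length (grid.headD []).length ∧
        pvVal ((fun vg (x : Int) =>
          (PySem.List.pyRange 0 ((grid.headD []).length : Int) 1).foldl (fun vg y =>
            ([((1:Int),(1:Int)), (1,0), (1,-1), (0,-1)] : List (Int × Int)).foldl (fun vg dir =>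
              if (pvA_countLoop cf (get_line_3 grid (x, y) 5 dir false) (1, 0)).2 = 5 ∧
                  (pvA_countLoop cf (get_line_3 grid (x, y) 5 dir false) (1, 0)).1 ≠ 0 then
                (PySem.List.pyRange 0 5 1).foldl (fun vg i =>
                  if PySem.List.pyGetD (get_line_3 grid (x, y) 5 dir false) i "" = "_" then
                    pvA_mulCell (pvA_mulCell vg (x + dir.1 * i) (y + dir.2 * i)
                        (pvA_countLoop cf (get_line_3 grid (x, y) 5 dir false) (1, 0)).1)
                      (x + dir.1 * i) (y + dir.2 * i)
                      (pvA_countLoop cf (get_line_3 grid (x, y) 5 dir false) (1, 0)).1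
                  else
                    pvA_setCell vg (x + dir.1 * i) (y + dir.2 * i) 0) vg
              else vg) vg) vg) vg x) a b =
          (PySem.List.pyRange 0 ((grid.headD []).length : Int) 1).foldl (fun v y =>
            ([((1:Int),(1:Int)), (1,0), (1,-1), (0,-1)] : List (Int × Int)).foldl (fun v d =>
              pvTr grid cf (grid.length : Int) ((grid.headD []).length : Int) a b x y d.1 d.2 v) v) (pvVal vg a b) := by
    intro vg x hsh
    exact pv_foldl_val (α := Int) a b grid.length (grid.headD []).length _ _
      (fun y v => ([((1:Int),(1:Int)), (1,0), (1,-1), (0,-1)] : List (Int × Int)).foldl (fun v d =>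
        pvTr grid cf (grid.length : Int) ((grid.headD []).length : Int) a b x y d.1 d.2 v) v)
      (fun vg y _ hsh' => hyprop x vg y hsh') vg hsh
  have hmain := pv_foldl_val (α := Int) a b grid.length (grid.headD []).length
    (PySem.List.pyRange 0 (grid.length : Int) 1) _
    (fun x v => (PySem.List.pyRange 0 ((grid.headD []).length : Int) 1).foldl (fun v y =>
      ([((1:Int),(1:Int)), (1,0), (1,-1), (0,-1)] : List (Int × Int)).foldl (fun v d =>
        pvTr grid cf (grid.length : Int) ((grid.headD []).length : Int) a b x y d.1 d.2 v) v) v)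
    (fun vg x _ hsh => hxprop vg x hsh)
    ((PySem.List.pyRange 0 (grid.length : Int) 1).foldl
        (fun vg _x => vg ++ [PySem.List.pyRepeat [(1 : Int)] ((grid.headD []).length : Int)]) [])
    (pv_init_shape grid)
  have hval1 := pv_init_val grid a b ha haR hb hbC
  unfold calculate_grid_intersection_values
  exact ⟨hmain.1, by rw [hmain.2, hval1]⟩


-- ---------- B assembled pointwise ----------

theorem pv_offGo_us (grid : List (List String)) (cf : String) (rows cols x y dx dy : Int)
    (hcell : pvCell grid x y = "_") (os : List Int) (v : Int) :
    pvB_offGo grid cf rows cols x y dx dy os v =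
      some (v * (os.map (fun o => pvC0 grid cf rows cols (x - dx * o) (y - dy * o) dx dy)).prod) := by
  have hcell' : PySem.List.pyGetD (PySem.List.pyGetD grid x []) y "n" = "_" := hcell
  induction os generalizing v with
  | nil => simp [pvB_offGo]
  | cons o os ih =>
    cases hwin : pvB_window grid cf rows cols (x - dx * o) (y - dy * o) dx dy with
    | some w =>
      have hstep : pvB_offGo grid cf rows cols x y dx dy (o :: os) v =
          pvB_offGo grid cf rows cols x y dx dy os
            (v * ((1 + (w.count cf : Int)) * (1 + (w.count cf : Int)))) := by
        simp [pvB_offGo, hwin, hcell']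
      rw [hstep, ih]
      have hok : pvOk grid cf rows cols (x - dx * o) (y - dy * o) dx dy = true := by
        unfold pvOk; rw [hwin]; rfl
      have hK : pvK grid cf rows cols (x - dx * o) (y - dy * o) dx dy = 1 + (w.count cf : Int) := by
        unfold pvK; rw [hwin]; rfl
      simp only [List.map_cons, List.prod_cons, pvC0, hok, if_pos rfl, hK]
      congr 1
      rw [if_pos trivial]
      ring
    | none =>
      simp only [pvB_offGo, hwin]
      rw [ih]
      have hok : pvOk grid cf rows cols (x - dx * o) (y - dy * o) dx dy = false := by
        unfold pvOk; rw [hwin]; rfl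
      simp only [List.map_cons, List.prod_cons, pvC0, hok]
      norm_num

theorem pv_dirGo_us (grid : List (List String)) (cf : String) (rows cols x y : Int)
    (hcell : pvCell grid x y = "_") (ds : List (Int × Int)) (v : Int) :
    pvB_dirGo grid cf rows cols x y ds v =
      some (v * (ds.map (fun d =>
        ((PySem.List.pyRange 0 5 1).map (fun o =>
          pvC0 grid cf rows cols (x - d.1 * o) (y - d.2 * o) d.1 d.2)).prod)).prod) := by
  induction ds generalizing v with
  | nil => simp [pvB_dirGo]
  | cons d ds ih =>
    simp only [pvB_dirGo]
    rw [pv_offGo_us grid cf rows cols x y d.1 d.2 hcell]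
    dsimp only
    rw [ih]
    simp only [List.map_cons, List.prod_cons]
    congr 1
    ring

theorem pv_cell_us (grid : List (List String)) (cf : String) (rows cols x y : Int)
    (hcell : pvCell grid x y = "_") :
    pvB_cellValue grid cf rows cols x y =
      (([((1:Int),(1:Int)), (1,0), (1,-1), (0,-1)] : List (Int × Int)).map (fun d =>
        ((PySem.List.pyRange 0 5 1).map (fun o =>
          pvC0 grid cf rows cols (x - d.1 * o) (y - d.2 * o) d.1 d.2)).prod)).prod := by
  unfold pvB_cellValue
  rw [pv_dirGo_us grid cf rows cols x y hcell]
  simp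

theorem pv_offGo_ne (grid : List (List String)) (cf : String) (rows cols x y dx dy : Int)
    (hcell : ¬ pvCell grid x y = "_") (os : List Int) (v : Int) :
    pvB_offGo grid cf rows cols x y dx dy os v =
      (if ∃ o ∈ os, pvOk grid cf rows cols (x - dx * o) (y - dy * o) dx dy = true then none else some v) := by
  have hcell' : ¬ PySem.List.pyGetD (PySem.List.pyGetD grid x []) y "n" = "_" := hcell
  induction os generalizing v with
  | nil => simp [pvB_offGo]
  | cons o os ih =>
    cases hwin : pvB_window grid cf rows cols (x - dx * o) (y - dy * o) dx dy with
    | some w =>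
      simp only [pvB_offGo, hwin, if_neg hcell']
      rw [if_pos]
      exact ⟨o, by simp, by unfold pvOk; rw [hwin]; rfl⟩
    | none =>
      simp only [pvB_offGo, hwin]
      rw [ih]
      have hok : pvOk grid cf rows cols (x - dx * o) (y - dy * o) dx dy = false := by
        unfold pvOk; rw [hwin]; rfl
      have hiff : (∃ o' ∈ o :: os, pvOk grid cf rows cols (x - dx * o') (y - dy * o') dx dy = true) ↔
          (∃ o' ∈ os, pvOk grid cf rows cols (x - dx * o') (y - dy * o') dx dy = true) := by
        constructor
        · rintro ⟨o', ho', hok'⟩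
          rcases List.mem_cons.1 ho' with h1 | h1
          · subst h1; rw [hok] at hok'; exact absurd hok' (by simp)
          · exact ⟨o', h1, hok'⟩
        · rintro ⟨o', ho', hok'⟩
          exact ⟨o', by simp [ho'], hok'⟩
      rw [if_congr hiff rfl rfl]

theorem pv_dirGo_ne (grid : List (List String)) (cf : String) (rows cols x y : Int)
    (hcell : ¬ pvCell grid x y = "_") (ds : List (Int × Int)) (v : Int) :
    pvB_dirGo grid cf rows cols x y ds v =
      (if ∃ d ∈ ds, ∃ o ∈ PySem.List.pyRange 0 5 1,
          pvOk grid cf rows cols (x - d.1 * o) (y - d.2 * o) d.1 d.2 = true then none else some v) := by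
  induction ds generalizing v with
  | nil => simp [pvB_dirGo]
  | cons d ds ih =>
    simp only [pvB_dirGo]
    rw [pv_offGo_ne grid cf rows cols x y d.1 d.2 hcell]
    by_cases hhead : ∃ o ∈ PySem.List.pyRange 0 5 1, pvOk grid cf rows cols (x - d.1 * o) (y - d.2 * o) d.1 d.2 = true
    · rw [if_pos hhead, if_pos ⟨d, by simp, hhead⟩]
    · rw [if_neg hhead]
      dsimp only
      rw [ih]
      have hiff : (∃ d' ∈ d :: ds, ∃ o ∈ PySem.List.pyRange 0 5 1,
          pvOk grid cf rows cols (x - d'.1 * o) (y - d'.2 * o) d'.1 d'.2 = true) ↔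
          (∃ d' ∈ ds, ∃ o ∈ PySem.List.pyRange 0 5 1,
          pvOk grid cf rows cols (x - d'.1 * o) (y - d'.2 * o) d'.1 d'.2 = true) := by
        constructor
        · rintro ⟨d', hd', hex⟩
          rcases List.mem_cons.1 hd' with h1 | h1
          · subst h1; exact absurd hex hhead
          · exact ⟨d', h1, hex⟩
        · rintro ⟨d', hd', hex⟩
          exact ⟨d', by simp [hd'], hex⟩
      rw [if_congr hiff rfl rfl]

def pvHitB (grid : List (List String)) (cf : String) (rows cols x y : Int) : Bool :=
  ([((1:Int),(1:Int)), (1,0), (1,-1), (0,-1)] : List (Int × Int)).any (fun d =>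
    (PySem.List.pyRange 0 5 1).any (fun o =>
      pvOk grid cf rows cols (x - d.1 * o) (y - d.2 * o) d.1 d.2))

theorem pvHitB_iff (grid : List (List String)) (cf : String) (rows cols x y : Int) :
    pvHitB grid cf rows cols x y = true ↔
      ∃ d ∈ ([((1:Int),(1:Int)), (1,0), (1,-1), (0,-1)] : List (Int × Int)),
        ∃ o ∈ PySem.List.pyRange 0 5 1,
          pvOk grid cf rows cols (x - d.1 * o) (y - d.2 * o) d.1 d.2 = true := by
  unfold pvHitB
  simp [List.any_eq_true]

theorem pv_cell_ne (grid : List (List String)) (cf : String) (rows cols x y : Int)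
    (hcell : ¬ pvCell grid x y = "_") :
    pvB_cellValue grid cf rows cols x y =
      (if pvHitB grid cf rows cols x y then (0:Int) else 1) := by
  unfold pvB_cellValue
  rw [pv_dirGo_ne grid cf rows cols x y hcell]
  by_cases h : pvHitB grid cf rows cols x y = true
  · rw [if_pos ((pvHitB_iff grid cf rows cols x y).1 h), if_pos h]
    rfl
  · rw [if_neg (fun hc => h ((pvHitB_iff grid cf rows cols x y).2 hc)), if_neg h]
    rfl


-- ---------- reindexing windows-by-start to windows-by-offset ----------

theorem pv_bool_false {b : Bool} (h : b = true → False) : b = false := by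
  cases b
  · rfl
  · exact absurd rfl h

def pvCd (grid : List (List String)) (cf : String) (R C a b x y dx dy : Int) : Int :=
  if pvOk grid cf R C x y dx dy && pvCover x y dx dy a b then
    pvK grid cf R C x y dx dy * pvK grid cf R C x y dx dy
  else 1

theorem pv_tr_us (grid : List (List String)) (cf : String) (R C a b x y dx dy v : Int)
    (hcell : pvCell grid a b = "_") :
    pvTr grid cf R C a b x y dx dy v = v * pvCd grid cf R C a b x y dx dy := by
  unfold pvTr pvCd
  split_ifs <;> first | rfl | ring | (exact absurd hcell ‹_›) | (exact absurd ‹_› hcell)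

theorem pv_tr_ne (grid : List (List String)) (cf : String) (R C a b x y dx dy v : Int)
    (hcell : ¬ pvCell grid a b = "_") :
    pvTr grid cf R C a b x y dx dy v =
      (if (pvOk grid cf R C x y dx dy && pvCover x y dx dy a b) = true then 0 else v) := by
  unfold pvTr
  split_ifs <;> first | rfl | ring | (exact absurd hcell ‹_›) | (exact absurd ‹_› hcell)

theorem pv_expand (grid : List (List String)) (cf : String) (R C a b x y dx dy : Int)
    (hnz : ¬ (dx = 0 ∧ dy = 0)) :
    pvCd grid cf R C a b x y dx dy =
      ((PySem.List.pyRange 0 5 1).map (fun o =>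
        if x = a - dx * o ∧ y = b - dy * o then
          pvC0 grid cf R C (a - dx * o) (b - dy * o) dx dy
        else 1)).prod := by
  by_cases hex : ∃ o ∈ PySem.List.pyRange 0 5 1, x = a - dx * o ∧ y = b - dy * o
  · obtain ⟨o0, ho0, h1⟩ := hex
    rw [pv_prod_single (PySem.List.pyRange 0 5 1) (PySem.List.nodup_pyRange_one 0 5)
      (fun o => x = a - dx * o ∧ y = b - dy * o) _ o0 ho0 h1
      (fun o ho hpo => pv_pos_inj x y dx dy a b o o0 hnz ⟨by omega, by omega⟩ ⟨by omega, by omega⟩)]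
    have hcov : pvCover x y dx dy a b = true := by
      rw [pv_cover_iff]
      exact ⟨o0, ho0, by omega, by omega⟩
    unfold pvCd pvC0
    rw [hcov, Bool.and_true]
    rw [← h1.1, ← h1.2]
  · have hcov : pvCover x y dx dy a b = false := by
      apply pv_bool_false
      intro h
      obtain ⟨i, hi, hih⟩ := (pv_cover_iff x y dx dy a b).1 h
      exact hex ⟨i, hi, by omega, by omega⟩
    unfold pvCd
    rw [hcov, Bool.and_false]
    symm
    rw [if_neg (by simp)]
    apply List.prod_eq_one
    intro z hz
    rcases List.mem_map.1 hz with ⟨o, ho, rfl⟩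
    rw [if_neg (fun hc => hex ⟨o, ho, hc⟩)]

theorem pv_reindex (grid : List (List String)) (cf : String) (Rn Cn : Nat) (a b dx dy : Int)
    (hnz : ¬ (dx = 0 ∧ dy = 0)) :
    ((PySem.List.pyRange 0 (Rn : Int) 1).map (fun x =>
      ((PySem.List.pyRange 0 (Cn : Int) 1).map (fun y =>
        pvCd grid cf (Rn : Int) (Cn : Int) a b x y dx dy)).prod)).prod =
    ((PySem.List.pyRange 0 5 1).map (fun o =>
      pvC0 grid cf (Rn : Int) (Cn : Int) (a - dx * o) (b - dy * o) dx dy)).prod := by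
  have step1 : ∀ x : Int,
      ((PySem.List.pyRange 0 (Cn : Int) 1).map (fun y =>
        pvCd grid cf (Rn : Int) (Cn : Int) a b x y dx dy)).prod =
      ((PySem.List.pyRange 0 5 1).map (fun o =>
        if x = a - dx * o ∧ ((0 : Int) ≤ b - dy * o ∧ b - dy * o < (Cn : Int)) then
          pvC0 grid cf (Rn : Int) (Cn : Int) (a - dx * o) (b - dy * o) dx dy
        else 1)).prod := by
    intro x
    rw [List.map_congr_left (fun y _ => pv_expand grid cf (Rn : Int) (Cn : Int) a b x y dx dy hnz)]
    rw [pv_prod_prod_comm (PySem.List.pyRange 0 (Cn : Int) 1) (PySem.List.pyRange 0 5 1)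
      (fun y o => if x = a - dx * o ∧ y = b - dy * o then
        pvC0 grid cf (Rn : Int) (Cn : Int) (a - dx * o) (b - dy * o) dx dy else 1)]
    apply congrArg
    apply List.map_congr_left
    intro o _
    rw [List.map_congr_left (fun y (_ : y ∈ PySem.List.pyRange 0 (Cn : Int) 1) => if_congr
        (Iff.intro
          (fun hc : x = a - dx * o ∧ y = b - dy * o => ⟨hc.2, hc.1⟩)
          (fun hc : y = b - dy * o ∧ x = a - dx * o => ⟨hc.2, hc.1⟩)) rfl rfl)]
    rw [pv_prod_ite_range Cn (b - dy * o) _ (x = a - dx * o)]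
    by_cases h1 : x = a - dx * o
    · by_cases h2 : (0 : Int) ≤ b - dy * o ∧ b - dy * o < (Cn : Int)
      · rw [if_pos ⟨⟨h2.1, h2.2⟩, h1⟩, if_pos ⟨h1, h2⟩]
      · rw [if_neg (fun hc => h2 ⟨hc.1.1, hc.1.2⟩), if_neg (fun hc => h2 hc.2)]
    · rw [if_neg (fun hc => h1 hc.2), if_neg (fun hc => h1 hc.1)]
  rw [List.map_congr_left (fun x _ => step1 x)]
  rw [pv_prod_prod_comm (PySem.List.pyRange 0 (Rn : Int) 1) (PySem.List.pyRange 0 5 1)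
    (fun x o => if x = a - dx * o ∧ ((0 : Int) ≤ b - dy * o ∧ b - dy * o < (Cn : Int)) then
      pvC0 grid cf (Rn : Int) (Cn : Int) (a - dx * o) (b - dy * o) dx dy else 1)]
  apply congrArg
  apply List.map_congr_left
  intro o _
  rw [pv_prod_ite_range Rn (a - dx * o) _ ((0 : Int) ≤ b - dy * o ∧ b - dy * o < (Cn : Int))]
  by_cases hbox : ((0 : Int) ≤ a - dx * o ∧ a - dx * o < (Rn : Int)) ∧
      ((0 : Int) ≤ b - dy * o ∧ b - dy * o < (Cn : Int))
  · rw [if_pos hbox]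
  · rw [if_neg hbox]
    have hok : pvOk grid cf (Rn : Int) (Cn : Int) (a - dx * o) (b - dy * o) dx dy = false := by
      apply pv_bool_false
      intro h
      have := pvOk_inb grid cf (Rn : Int) (Cn : Int) (a - dx * o) (b - dy * o) dx dy h
      simp [pvInb] at this
      apply hbox
      constructor
      · constructor <;> omega
      · constructor <;> omega
    unfold pvC0
    rw [hok]
    rfl


-- ---------- the per-cell equality ----------

def pvHitD (grid : List (List String)) (cf : String) (R C a b x y : Int) : Bool :=
  ([((1:Int),(1:Int)), (1,0), (1,-1), (0,-1)] : List (Int × Int)).any (fun d =>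
    pvOk grid cf R C x y d.1 d.2 && pvCover x y d.1 d.2 a b)

def pvHitY (grid : List (List String)) (cf : String) (R C a b x : Int) : Bool :=
  (PySem.List.pyRange 0 C 1).any (fun y => pvHitD grid cf R C a b x y)

theorem pvHitD_iff (grid : List (List String)) (cf : String) (R C a b x y : Int) :
    (∃ d ∈ ([((1:Int),(1:Int)), (1,0), (1,-1), (0,-1)] : List (Int × Int)),
      (pvOk grid cf R C x y d.1 d.2 && pvCover x y d.1 d.2 a b) = true) ↔
      pvHitD grid cf R C a b x y = true := by
  unfold pvHitD
  rw [List.any_eq_true]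

theorem pvHitY_iff (grid : List (List String)) (cf : String) (R C a b x : Int) :
    (∃ y ∈ PySem.List.pyRange 0 C 1, pvHitD grid cf R C a b x y = true) ↔
      pvHitY grid cf R C a b x = true := by
  unfold pvHitY
  rw [List.any_eq_true]


theorem pv_core (grid : List (List String)) (cf : String) (a b : Int) :
    (PySem.List.pyRange 0 (grid.length : Int) 1).foldl (fun v x =>
      (PySem.List.pyRange 0 ((grid.headD []).length : Int) 1).foldl (fun v y =>
        ([((1:Int),(1:Int)), (1,0), (1,-1), (0,-1)] : List (Int × Int)).foldl (fun v d =>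
          pvTr grid cf (grid.length : Int) ((grid.headD []).length : Int) a b x y d.1 d.2 v) v) v) 1 =
    pvB_cellValue grid cf (grid.length : Int) ((grid.headD []).length : Int) a b := by
  have hnzd : ∀ d ∈ ([((1:Int),(1:Int)), (1,0), (1,-1), (0,-1)] : List (Int × Int)),
      ¬ (d.1 = 0 ∧ d.2 = 0) := by
    intro d hd
    have : d = ((1:Int),(1:Int)) ∨ d = (1,0) ∨ d = (1,-1) ∨ d = (0,-1) := by simpa using hd
    rcases this with rfl | rfl | rfl | rfl <;> simp
  by_cases hcell : pvCell grid a b = "_"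
  · have hdir : ∀ (x y v : Int),
        ([((1:Int),(1:Int)), (1,0), (1,-1), (0,-1)] : List (Int × Int)).foldl (fun v d =>
          pvTr grid cf (grid.length : Int) ((grid.headD []).length : Int) a b x y d.1 d.2 v) v =
        v * (([((1:Int),(1:Int)), (1,0), (1,-1), (0,-1)] : List (Int × Int)).map (fun d =>
          pvCd grid cf (grid.length : Int) ((grid.headD []).length : Int) a b x y d.1 d.2)).prod := by
      intro x y v
      rw [PySem.List.foldl_congr_mem _ _ (fun v (d : Int × Int) =>
        v * pvCd grid cf (grid.length : Int) ((grid.headD []).length : Int) a b x y d.1 d.2)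
        _ (fun (acc : Int) (d : Int × Int) (_ : d ∈ ([((1:Int),(1:Int)), (1,0), (1,-1), (0,-1)] : List (Int × Int))) => pv_tr_us grid cf _ _ a b x y d.1 d.2 acc hcell)]
      exact pv_foldl_mul_pair _ _ v
    have hy : ∀ (x v : Int),
        (PySem.List.pyRange 0 ((grid.headD []).length : Int) 1).foldl (fun v y =>
          ([((1:Int),(1:Int)), (1,0), (1,-1), (0,-1)] : List (Int × Int)).foldl (fun v d =>
            pvTr grid cf (grid.length : Int) ((grid.headD []).length : Int) a b x y d.1 d.2 v) v) v =
        v * ((PySem.List.pyRange 0 ((grid.headD []).length : Int) 1).map (fun y =>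
          (([((1:Int),(1:Int)), (1,0), (1,-1), (0,-1)] : List (Int × Int)).map (fun d =>
            pvCd grid cf (grid.length : Int) ((grid.headD []).length : Int) a b x y d.1 d.2)).prod)).prod := by
      intro x v
      rw [PySem.List.foldl_congr_mem _ _ (fun v (y : Int) =>
        v * (([((1:Int),(1:Int)), (1,0), (1,-1), (0,-1)] : List (Int × Int)).map (fun d =>
          pvCd grid cf (grid.length : Int) ((grid.headD []).length : Int) a b x y d.1 d.2)).prod)
        _ (fun (acc : Int) (y : Int) (_ : y ∈ PySem.List.pyRange 0 ((grid.headD []).length : Int) 1) => hdir x y acc)]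
      exact pv_foldl_mul _ _ v
    rw [PySem.List.foldl_congr_mem _ _ (fun v (x : Int) =>
        v * ((PySem.List.pyRange 0 ((grid.headD []).length : Int) 1).map (fun y =>
          (([((1:Int),(1:Int)), (1,0), (1,-1), (0,-1)] : List (Int × Int)).map (fun d =>
            pvCd grid cf (grid.length : Int) ((grid.headD []).length : Int) a b x y d.1 d.2)).prod)).prod)
      _ (fun (acc : Int) (x : Int) (_ : x ∈ PySem.List.pyRange 0 (grid.length : Int) 1) => hy x acc)]
    rw [pv_foldl_mul, one_mul]
    rw [pv_cell_us grid cf (grid.length : Int) ((grid.headD []).length : Int) a b hcell]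
    rw [List.map_congr_left (fun x (_ : x ∈ PySem.List.pyRange 0 (grid.length : Int) 1) =>
      pv_prod_prod_comm (PySem.List.pyRange 0 ((grid.headD []).length : Int) 1)
        ([((1:Int),(1:Int)), (1,0), (1,-1), (0,-1)] : List (Int × Int))
        (fun y d => pvCd grid cf (grid.length : Int) ((grid.headD []).length : Int) a b x y d.1 d.2))]
    rw [pv_prod_prod_comm (PySem.List.pyRange 0 (grid.length : Int) 1)
      ([((1:Int),(1:Int)), (1,0), (1,-1), (0,-1)] : List (Int × Int))
      (fun x d => ((PySem.List.pyRange 0 ((grid.headD []).length : Int) 1).map (fun y =>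
        pvCd grid cf (grid.length : Int) ((grid.headD []).length : Int) a b x y d.1 d.2)).prod)]
    apply congrArg
    apply List.map_congr_left
    intro d hd
    exact pv_reindex grid cf grid.length (grid.headD []).length a b d.1 d.2 (hnzd d hd)
  · have hdir : ∀ (x y v : Int),
        ([((1:Int),(1:Int)), (1,0), (1,-1), (0,-1)] : List (Int × Int)).foldl (fun v d =>
          pvTr grid cf (grid.length : Int) ((grid.headD []).length : Int) a b x y d.1 d.2 v) v =
        (if pvHitD grid cf (grid.length : Int) ((grid.headD []).length : Int) a b x y then (0:Int) else v) := by
      intro x y v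
      rw [PySem.List.foldl_congr_mem _ _ (fun v (d : Int × Int) =>
        if (pvOk grid cf (grid.length : Int) ((grid.headD []).length : Int) x y d.1 d.2 &&
          pvCover x y d.1 d.2 a b) = true then (0:Int) else v)
        _ (fun (acc : Int) (d : Int × Int) (_ : d ∈ ([((1:Int),(1:Int)), (1,0), (1,-1), (0,-1)] : List (Int × Int))) => pv_tr_ne grid cf _ _ a b x y d.1 d.2 acc hcell)]
      rw [pv_foldl_zero _ _ v]
      exact if_congr (by rw [pvHitD_iff]) rfl rfl
    have hy : ∀ (x v : Int),
        (PySem.List.pyRange 0 ((grid.headD []).length : Int) 1).foldl (fun v y =>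
          ([((1:Int),(1:Int)), (1,0), (1,-1), (0,-1)] : List (Int × Int)).foldl (fun v d =>
            pvTr grid cf (grid.length : Int) ((grid.headD []).length : Int) a b x y d.1 d.2 v) v) v =
        (if pvHitY grid cf (grid.length : Int) ((grid.headD []).length : Int) a b x then (0:Int) else v) := by
      intro x v
      rw [PySem.List.foldl_congr_mem _ _ (fun v (y : Int) =>
        if pvHitD grid cf (grid.length : Int) ((grid.headD []).length : Int) a b x y then (0:Int) else v)
        _ (fun (acc : Int) (y : Int) (_ : y ∈ PySem.List.pyRange 0 ((grid.headD []).length : Int) 1) => hdir x y acc)]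
      rw [pv_foldl_zero (fun y : Int =>
        pvHitD grid cf (grid.length : Int) ((grid.headD []).length : Int) a b x y = true) _ v]
      exact if_congr (by rw [pvHitY_iff]) rfl rfl
    rw [PySem.List.foldl_congr_mem _ _ (fun v (x : Int) =>
        if pvHitY grid cf (grid.length : Int) ((grid.headD []).length : Int) a b x then (0:Int) else v)
      _ (fun (acc : Int) (x : Int) (_ : x ∈ PySem.List.pyRange 0 (grid.length : Int) 1) => hy x acc)]
    rw [pv_foldl_zero (fun x : Int =>
      pvHitY grid cf (grid.length : Int) ((grid.headD []).length : Int) a b x = true) _ 1]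
    rw [pv_cell_ne grid cf (grid.length : Int) ((grid.headD []).length : Int) a b hcell]
    refine if_congr ?_ rfl rfl
    constructor
    · rintro ⟨x, hx, hYx⟩
      apply (pvHitB_iff grid cf (grid.length : Int) ((grid.headD []).length : Int) a b).mpr
      obtain ⟨y, hyy, hD⟩ := (pvHitY_iff grid cf _ _ a b x).mpr hYx
      obtain ⟨d, hd, hc⟩ := (pvHitD_iff grid cf _ _ a b x y).mpr hD
      rw [Bool.and_eq_true] at hc
      obtain ⟨i, hi, hih⟩ := (pv_cover_iff x y d.1 d.2 a b).1 hc.2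
      refine ⟨d, hd, i, hi, ?_⟩
      have h1 : a - d.1 * i = x := by omega
      have h2 : b - d.2 * i = y := by omega
      rw [h1, h2]
      exact hc.1
    · intro hB
      obtain ⟨d, hd, o, ho, hok⟩ := (pvHitB_iff grid cf (grid.length : Int) ((grid.headD []).length : Int) a b).mp hB
      have hinb := pvOk_inb grid cf _ _ _ _ d.1 d.2 hok
      simp [pvInb] at hinb
      rw [← List.headD_eq_head?_getD] at hinb
      refine ⟨a - d.1 * o, PySem.List.mem_pyRange_one.2 ⟨by omega, by omega⟩, ?_⟩
      apply (pvHitY_iff grid cf _ _ a b _).mp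
      refine ⟨b - d.2 * o, PySem.List.mem_pyRange_one.2 ⟨by omega, by omega⟩, ?_⟩
      apply (pvHitD_iff grid cf _ _ a b _ _).mp
      refine ⟨d, hd, ?_⟩
      rw [Bool.and_eq_true]
      exact ⟨hok, (pv_cover_iff _ _ d.1 d.2 a b).2 ⟨o, ho, by omega, by omega⟩⟩

-- ---------- list-level assembly ----------

theorem pv_val_eq_getElem (vg : List (List Int)) (Rn Cn : Nat) (hsh : pvShape vg Rn Cn)
    (i j : Nat) (h1 : i < vg.length) (h2 : j < (vg[i]'h1).length) :
    pvVal vg (i : Int) (j : Int) = (vg[i]'h1)[j]'h2 := by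
  unfold pvVal
  rw [PySem.List.pyGetD_natCast vg i []]
  rw [List.getD_eq_getElem?_getD, List.getElem?_eq_getElem h1]
  rw [PySem.List.pyGetD_natCast _ j 0]
  rw [List.getD_eq_getElem?_getD]
  simp [List.getElem?_eq_getElem h2]

theorem pv_alt_form (grid : List (List String)) (cf : String) :
    calculate_grid_intersection_values_alt grid cf =
      (PySem.List.pyRange 0 (grid.length : Int) 1).map (fun x =>
        (PySem.List.pyRange 0 ((grid.headD []).length : Int) 1).map (fun y =>
          pvB_cellValue grid cf (grid.length : Int) ((grid.headD []).length : Int) x y)) := rfl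

theorem pv_spec_zeroC (grid : List (List String)) (cf : String)
    (hC : (grid.headD []).length = 0) :
    calculate_grid_intersection_values grid cf = calculate_grid_intersection_values_alt grid cf := by
  have hCz : ((grid.headD []).length : Int) = 0 := by omega
  unfold calculate_grid_intersection_values
  rw [hCz]
  rw [PySem.List.foldl_congr_mem _ _ (fun (vg : List (List Int)) (_x : Int) => vg) _
    (fun (acc : List (List Int)) (x : Int) (_ : x ∈ PySem.List.pyRange 0 (grid.length : Int) 1) => by
      rw [PySem.List.pyRange_one_eq_nil (le_refl 0)]
      rfl)]
  rw [PySem.List.foldl_ignore]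
  rw [pv_alt_form grid cf, hCz]
  rw [PySem.List.foldl_append_singleton_eq_map
    (f := fun _x : Int => PySem.List.pyRepeat [(1 : Int)] 0)]
  rw [PySem.List.pyRange_one_eq_nil (le_refl 0)]
  simp [PySem.List.pyRepeat_singleton]

theorem pv_spec_main (grid : List (List String)) (cf : String) (hcf : cf ≠ "n")
    (hC : 0 < (grid.headD []).length) :
    calculate_grid_intersection_values grid cf = calculate_grid_intersection_values_alt grid cf := by
  by_cases hR : grid.length = 0
  · have : grid = [] := List.length_eq_zero_iff.1 hR
    subst this
    rfl
  · have hsh : pvShape (calculate_grid_intersection_values grid cf) grid.length (grid.headD []).length :=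
      (pv_A_val_full grid cf hcf 0 0 (by omega) (by omega) (by omega) (by omega)).1
    apply List.ext_getElem
    · rw [hsh.1]
      simp only [pv_alt_form, List.length_map, PySem.List.length_pyRange_one]
      omega
    · intro i h1 h2
      apply List.ext_getElem
      · have hrow : (calculate_grid_intersection_values grid cf)[i] ∈ calculate_grid_intersection_values grid cf :=
          List.getElem_mem h1
        rw [hsh.2 _ hrow]
        simp only [pv_alt_form, List.getElem_map, List.length_map, PySem.List.length_pyRange_one]
        omega
      · intro j h3 h4
        have hiR : i < grid.length := by
          have := hsh.1; omega
        have hjC : j < (grid.headD []).length := by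
          have := hsh.2 _ (List.getElem_mem h1)
          omega
        rw [← pv_val_eq_getElem (calculate_grid_intersection_values grid cf)
          grid.length (grid.headD []).length hsh i j h1 h3]
        have hval := (pv_A_val_full grid cf hcf (i : Int) (j : Int)
          (by omega) (by omega) (by omega) (by omega)).2
        rw [hval, pv_core grid cf (i : Int) (j : Int)]
        simp only [pv_alt_form, List.getElem_map, PySem.List.getElem_pyRange_one]
        norm_num

-- ===== VERDICT (by name: the statement is the Claim_ definition above) =====
theorem calculate_grid_intersection_values_spec : Claim_equal_calculate_grid_intersection_values := by
  intro grid cf hdom hpre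
  unfold Spec_calculate_grid_intersection_values
  obtain ⟨hne, hrows, hcf⟩ := hpre
  by_cases hC : (grid.headD []).length = 0
  · exact pv_spec_zeroC grid cf hC
  · exact pv_spec_main grid cf hcf (by omega)
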